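-- pv_equiv track=rewrite | github.com/Tmh3101/convert-grammar-to-cnf | grammar_processor.py | generate_rule_with_nullable
-- ===== SOURCE A (Python) =====
-- from itertools import combinations
--
-- def generate_rule_with_nullable(value, nullable):
--     value_list = list(value)  # Chuyển tuple thành list để dễ xử lý
--     result = set()
--     for i in range(len(nullable)):
--         # combinations(nullable, i + 1) - tạo ra tất cả tập con của nullable có độ dài r + 1 (1 -> len(nullable))
--         # combinations tạo tập gồm các giá trị sẽ bị xóa khỏi value
--         for combo in combinations(nullable, i + 1):
--             temp = value_list.copy()
--             # Xóa từng ký tự trong combo khỏi value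
--             for pattern in combo:
--                 if pattern in temp:
--                     temp.remove(pattern) # Xóa
--             result.add(tuple(temp)) # Chuyển lại thành tuple và thêm vào result
--
--     result.discard(tuple()) # Xóa tuple rỗng - không phải tất cả đều bị xóa
--     return result
-- ===== SOURCE B (Python) =====
-- from itertools import combinations
--
-- def generate_rule_with_nullable(value, nullable):
--     value_list = list(value)
--     result = set()
--     for r in range(1, len(nullable) + 1):
--         for combo in combinations(nullable, r):
--             # net effect of deleting the combo: a quota per symbol, then one
--             # pass over value keeping what exceeds its quota
--             quota = {}
--             for p in combo:
--                 quota[p] = quota.get(p, 0) + 1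
--             kept = []
--             for x in value_list:
--                 if quota.get(x, 0) > 0:
--                     quota[x] = quota.get(x, 0) - 1
--                 else:
--                     kept.append(x)
--             if kept:
--                 result.add(tuple(kept))
--     return result
-- ===== Notes on version B (the rewrite author's own statement) =====
-- stated objective: alternative
-- what changed: Per combination, B replaces A's sequence of 'in'-membership scans and list.remove calls on a mutating copy of value by a counting dict built from the combo plus a single quota-filter pass over value, and skips empty results on insertion instead of discarding the empty tuple at the end.
import Mathlib
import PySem

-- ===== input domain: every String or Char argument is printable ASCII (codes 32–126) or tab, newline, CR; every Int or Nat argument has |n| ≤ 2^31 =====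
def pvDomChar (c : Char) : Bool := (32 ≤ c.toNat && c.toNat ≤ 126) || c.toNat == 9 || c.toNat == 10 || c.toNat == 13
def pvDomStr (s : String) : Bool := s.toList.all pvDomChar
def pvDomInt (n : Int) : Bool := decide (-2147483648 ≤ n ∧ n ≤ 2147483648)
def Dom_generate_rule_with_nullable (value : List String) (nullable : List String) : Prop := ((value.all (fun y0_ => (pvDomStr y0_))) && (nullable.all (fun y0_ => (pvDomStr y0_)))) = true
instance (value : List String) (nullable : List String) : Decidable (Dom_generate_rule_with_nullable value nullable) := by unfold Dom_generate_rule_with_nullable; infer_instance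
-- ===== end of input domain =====

-- B replaces A's per-combo sequence of `in`/`remove` scans by a counting dict and a single
-- pass over value, and skips empty results up front instead of discarding at the end
-- (same enumeration of combos, identical returned set).

-- ===== PORT A =====
-- 'if pattern in temp: temp.remove(pattern)'
def pvRemoveIf (temp : List String) (p : String) : List String :=
  if p ∈ temp then (PySem.List.remove? temp p).getD temp else temp

-- the inner 'for pattern in combo' loop on a fresh copy of value_list
def pvApplyCombo (value_list : List String) (combo : List String) : List String :=
  combo.foldl pvRemoveIf value_list

def generate_rule_with_nullable (value : List String) (nullable : List String) : List (List String) :=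
  let value_list := value
  let result : PySem.Set (List String) :=
    (PySem.List.pyRange 0 (nullable.length : Int) 1).foldl
      (fun result i =>
        (PySem.List.combinations nullable (i.toNat + 1)).foldl
          (fun result combo => PySem.Set.add result (pvApplyCombo value_list combo))
          result)
      PySem.Set.empty
  PySem.Set.discard result []

-- ===== PORT B =====
-- 'quota = {}; for p in combo: quota[p] = quota.get(p, 0) + 1'
def pvQuotaOf (combo : List String) : PySem.Dict String Int :=
  combo.foldl (fun q p => q.insert p (q.getD p 0 + 1)) PySem.Dict.empty

-- 'kept = []; for x in value_list: …' (the dict is mutated, so it is part of the state)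
def pvKeptOf (value_list : List String) (quota : PySem.Dict String Int) : List String :=
  (value_list.foldl
    (fun (st : PySem.Dict String Int × List String) x =>
      if st.1.getD x 0 > 0 then (st.1.insert x (st.1.getD x 0 - 1), st.2)
      else (st.1, st.2 ++ [x]))
    (quota, [])).2

def generate_rule_with_nullable_alt (value : List String) (nullable : List String) : List (List String) :=
  let value_list := value
  (PySem.List.pyRange 1 ((nullable.length : Int) + 1) 1).foldl
    (fun result r =>
      (PySem.List.combinations nullable r.toNat).foldl
        (fun result combo =>
          let kept := pvKeptOf value_list (pvQuotaOf combo)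
          if kept ≠ [] then PySem.Set.add result kept else result)
        result)
    PySem.Set.empty

-- ===== PRECONDITION & SPEC =====
def Spec_generate_rule_with_nullable (value : List String) (nullable : List String) (out : List (List String)) : Prop := out = generate_rule_with_nullable_alt value nullable
instance (value : List String) (nullable : List String) (out : List (List String)) : Decidable (Spec_generate_rule_with_nullable value nullable out) := by unfold Spec_generate_rule_with_nullable; infer_instance

-- ===== CLAIM (what is proved, stated in full; the proofs are below) =====
def Claim_equal_generate_rule_with_nullable : Prop := ∀ (value : List String) (nullable : List String), Dom_generate_rule_with_nullable value nullable → Spec_generate_rule_with_nullable value nullable (generate_rule_with_nullable value nullable)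

-- ===== LEMMAS AND PROOFS =====

-- mathematical form of the quota filter: drop x while f x > 0 (decrementing), keep it otherwise
def pvFilterQ (value_list : List String) (f : String → Int) : List String :=
  match value_list with
  | [] => []
  | x :: xs => if f x > 0 then pvFilterQ xs (fun y => if y = x then f x - 1 else f y)
               else x :: pvFilterQ xs f

theorem pvFilterQ_cons (x : String) (xs : List String) (f : String → Int) :
    pvFilterQ (x :: xs) f
      = if f x > 0 then pvFilterQ xs (fun y => if y = x then f x - 1 else f y)
        else x :: pvFilterQ xs f := rfl

theorem pvFilterQ_congr (value_list : List String) : ∀ (f g : String → Int),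
    (∀ s ∈ value_list, f s = g s) → pvFilterQ value_list f = pvFilterQ value_list g := by
  induction value_list with
  | nil => intro f g _; rfl
  | cons x xs ih =>
    intro f g h
    have hx : f x = g x := h x (List.mem_cons_self ..)
    simp only [pvFilterQ, hx]
    by_cases hg : g x > 0
    · simp only [if_pos hg]
      apply ih
      intro s hs
      by_cases hsx : s = x
      · simp [hsx]
      · simp [hsx, h s (List.mem_cons_of_mem _ hs)]
    · simp only [if_neg hg]
      rw [ih f g (fun s hs => h s (List.mem_cons_of_mem _ hs))]

theorem pvKeptOf_aux (value_list : List String) : ∀ (q : PySem.Dict String Int) (acc : List String),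
    (value_list.foldl
      (fun (st : PySem.Dict String Int × List String) x =>
        if st.1.getD x 0 > 0 then (st.1.insert x (st.1.getD x 0 - 1), st.2)
        else (st.1, st.2 ++ [x]))
      (q, acc)).2 = acc ++ pvFilterQ value_list (fun s => q.getD s 0) := by
  induction value_list with
  | nil => intro q acc; simp [pvFilterQ]
  | cons x xs ih =>
    intro q acc
    simp only [List.foldl_cons, pvFilterQ]
    by_cases h : q.getD x 0 > 0
    · simp only [if_pos h]
      rw [ih]
      congr 1
      apply pvFilterQ_congr
      intro s _
      rw [PySem.Dict.getD_insert]
    · simp only [if_neg h]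
      rw [ih, List.append_assoc, List.singleton_append]

theorem pvKeptOf_eq (value_list : List String) (q : PySem.Dict String Int) :
    pvKeptOf value_list q = pvFilterQ value_list (fun s => q.getD s 0) := by
  simp [pvKeptOf, pvKeptOf_aux]

theorem pvQuotaOf_getD (combo : List String) (s : String) :
    (pvQuotaOf combo).getD s 0 = (combo.count s : Int) := by
  simp [pvQuotaOf, PySem.Dict.getD_foldl_insert_add_one]

theorem pvFilterQ_of_nonpos (value_list : List String) (f : String → Int)
    (h : ∀ s ∈ value_list, ¬ f s > 0) : pvFilterQ value_list f = value_list := by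
  induction value_list with
  | nil => rfl
  | cons x xs ih =>
    simp only [pvFilterQ, if_neg (h x (List.mem_cons_self ..))]
    rw [ih (fun s hs => h s (List.mem_cons_of_mem _ hs))]

theorem pvRemoveIf_cons_ne (x p : String) (xs : List String) (hxp : x ≠ p) :
    pvRemoveIf (x :: xs) p = x :: pvRemoveIf xs p := by
  by_cases hp : p ∈ xs
  · have hmem : p ∈ x :: xs := List.mem_cons_of_mem _ hp
    simp only [pvRemoveIf, if_pos hmem, if_pos hp,
      PySem.List.remove?_eq_some_erase (x :: xs) p hmem,
      PySem.List.remove?_eq_some_erase xs p hp, Option.getD_some]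
    simp [hxp]
  · have hmem : p ∉ x :: xs := by
      intro hc
      rcases List.mem_cons.mp hc with h1 | h2
      · exact hxp h1.symm
      · exact hp h2
    simp only [pvRemoveIf, if_neg hmem, if_neg hp]

theorem pvFilterQ_removeIf (value_list : List String) : ∀ (p : String) (f : String → Int),
    (∀ s, 0 ≤ f s) →
    pvFilterQ (pvRemoveIf value_list p) f
      = pvFilterQ value_list (fun y => if y = p then f p + 1 else f y) := by
  induction value_list with
  | nil => intro p f _; simp [pvRemoveIf, pvFilterQ]
  | cons x xs ih =>
    intro p f hf
    by_cases hxp : x = p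
    · subst hxp
      have hmem : x ∈ x :: xs := List.mem_cons_self ..
      simp only [pvRemoveIf, if_pos hmem, PySem.List.remove?_cons_self,
        Option.getD_some]
      have hpos : (fun y => if y = x then f x + 1 else f y) x > 0 := by
        show (if x = x then f x + 1 else f x) > 0
        rw [if_pos rfl]
        have := hf x; omega
      rw [pvFilterQ_cons, if_pos hpos]
      apply pvFilterQ_congr
      intro s _
      by_cases hsx : s = x <;> simp [hsx]
    · rw [pvRemoveIf_cons_ne x p xs hxp]
      simp only [pvFilterQ]
      have hgx : (if x = p then f p + 1 else f x) = f x := by simp [hxp]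
      rw [hgx]
      by_cases hfx : f x > 0
      · simp only [if_pos hfx]
        rw [ih p (fun y => if y = x then f x - 1 else f y)
          (by intro s
              by_cases hs : s = x
              · simp only [hs, if_pos]; omega
              · simp only [if_neg hs]; exact hf s)]
        apply pvFilterQ_congr
        intro s _
        by_cases hsp : s = p
        · subst hsp
          simp [Ne.symm hxp]
        · by_cases hsx : s = x <;> simp [hsx, hsp, hxp]
      · simp only [if_neg hfx]
        rw [ih p f hf]

theorem pvApplyCombo_eq (combo : List String) : ∀ (value_list : List String),
    pvApplyCombo value_list combo = pvFilterQ value_list (fun s => (combo.count s : Int)) := by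
  induction combo with
  | nil =>
    intro value_list
    simp only [pvApplyCombo, List.foldl_nil]
    rw [pvFilterQ_of_nonpos]
    intro s _
    simp
  | cons p combo ih =>
    intro value_list
    simp only [pvApplyCombo, List.foldl_cons]
    rw [show (List.foldl pvRemoveIf (pvRemoveIf value_list p) combo)
        = pvApplyCombo (pvRemoveIf value_list p) combo from rfl]
    rw [ih (pvRemoveIf value_list p)]
    rw [pvFilterQ_removeIf value_list p (fun s => (combo.count s : Int)) (by intro s; positivity)]
    apply pvFilterQ_congr
    intro s _
    by_cases hsp : s = p
    · subst hsp
      simp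
    · have hps : ¬p = s := fun h => hsp h.symm
      simp [hsp, hps]

theorem pvPerCombo (value_list combo : List String) :
    pvApplyCombo value_list combo = pvKeptOf value_list (pvQuotaOf combo) := by
  rw [pvKeptOf_eq, pvApplyCombo_eq]
  exact pvFilterQ_congr _ _ _ (fun s _ => by rw [pvQuotaOf_getD])

-- pushing the final 'discard []' through one Set.add
theorem pvDiscard_add (s : PySem.Set (List String)) (y : List String) :
    PySem.Set.discard (PySem.Set.add s y) [] =
      if y ≠ [] then PySem.Set.add (PySem.Set.discard s []) y else PySem.Set.discard s [] := by
  by_cases hy : y = []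
  · subst hy
    by_cases hm : ([] : List String) ∈ s
    · simp [PySem.Set.add, PySem.Set.discard, hm]
    · simp [PySem.Set.add, PySem.Set.discard, hm, List.filter_append]
  · by_cases hm : y ∈ s
    · have hm2 : y ∈ PySem.Set.discard s [] := by
        simp [PySem.Set.discard, List.mem_filter, hm, hy]
      simp [PySem.Set.add, hm, hm2, hy]
    · have hm2 : y ∉ PySem.Set.discard s [] := by
        simp only [PySem.Set.discard, List.mem_filter]
        intro h
        exact absurd h.1 hm
      simp [PySem.Set.add, PySem.Set.discard, hm, hy, List.filter_append]

-- one inner loop: discard-at-the-end = skip-on-insertion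
theorem pvDiscard_foldl_add (g : List String → List String) (ys : List (List String)) :
    ∀ (s : PySem.Set (List String)),
    PySem.Set.discard (ys.foldl (fun s y => PySem.Set.add s (g y)) s) [] =
      ys.foldl (fun s y => if g y ≠ [] then PySem.Set.add s (g y) else s)
        (PySem.Set.discard s []) := by
  induction ys with
  | nil => intro s; rfl
  | cons y ys ih =>
    intro s
    simp only [List.foldl_cons]
    rw [ih, pvDiscard_add]

-- both nested loops at once
theorem pvDiscard_nested (g : List String → List String) (C : ℕ → List (List String))
    (ks : List ℕ) : ∀ (s : PySem.Set (List String)),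
    PySem.Set.discard
        (ks.foldl (fun s k => (C k).foldl (fun s y => PySem.Set.add s (g y)) s) s) [] =
      ks.foldl (fun s k => (C k).foldl
          (fun s y => if g y ≠ [] then PySem.Set.add s (g y) else s) s)
        (PySem.Set.discard s []) := by
  induction ks with
  | nil => intro s; rfl
  | cons k ks ih =>
    intro s
    simp only [List.foldl_cons]
    rw [ih, pvDiscard_foldl_add]

-- B's 'range(1, len(nullable) + 1)'
theorem pvRange1 (n : ℕ) :
    PySem.List.pyRange 1 ((n : Int) + 1) 1
      = (List.range n).map (fun k : ℕ => ((k : Int) + 1)) := by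
  induction n with
  | zero => simp [PySem.List.pyRange_one_eq_nil]
  | succ m ih =>
    rw [show ((m + 1 : ℕ) : Int) + 1 = ((m : Int) + 1) + 1 by push_cast; ring]
    rw [PySem.List.pyRange_one_succ_right (show (1 : Int) ≤ (m : Int) + 1 by omega), ih]
    simp [List.range_succ]

-- ===== VERDICT (by name: the statement is the Claim_ definition above) =====
theorem generate_rule_with_nullable_spec : Claim_equal_generate_rule_with_nullable := by
  intro value nullable _
  unfold Spec_generate_rule_with_nullable generate_rule_with_nullable generate_rule_with_nullable_alt
  simp only [pvRange1, PySem.List.pyRange_zero_nat, List.foldl_map, Int.toNat_natCast,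
    show ∀ k : ℕ, ((k : Int) + 1).toNat = k + 1 from fun k => by omega]
  rw [pvDiscard_nested (fun c => pvApplyCombo value c)
    (fun k => PySem.List.combinations nullable (k + 1)) (List.range nullable.length)
    PySem.Set.empty]
  simp only [pvPerCombo]
  rfl
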